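-- pv_equiv track=rewrite | github.com/canonical/prometheus-hardware-exporter | prometheus_hardware_exporter/collectors/storcli.py | count_virtual_drive_state
-- ===== SOURCE A (Python) =====
-- from typing import Any, Dict, List, Set, Tuple
--
-- def count_virtual_drive_state(
--     virtual_drives: List[Dict[str, str]], state: Set
-- ) -> Tuple[int, int, int]:
--     """Count the number of virtual drive in a particular state."""
--     ready_virtual_drives = 0
--     unready_virtual_drives = 0
--     for virtual_drive in virtual_drives:
--         ready = virtual_drive["state"] in state
--         ready_virtual_drives += ready
--         unready_virtual_drives += not ready
--     return (
--         ready_virtual_drives + unready_virtual_drives,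
--         ready_virtual_drives,
--         unready_virtual_drives,
--     )
-- ===== SOURCE B (Python) =====
-- from typing import Dict, List, Set, Tuple
--
-- def count_virtual_drive_state(
--     virtual_drives: List[Dict[str, str]], state: Set
-- ) -> Tuple[int, int, int]:
--     """Count the number of virtual drive in a particular state."""
--     # Build a frequency table of the drives' states once, then sum the
--     # frequencies of the distinct requested states: no per-drive membership scan.
--     counts = {}
--     for vd in virtual_drives:
--         k = vd["state"]
--         counts[k] = counts.get(k, 0) + 1
--     ready = 0
--     for s in set(state):
--         ready += counts.get(s, 0)
--     total = len(virtual_drives)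
--     return (total, ready, total - ready)
-- ===== Notes on version B (the rewrite author's own statement) =====
-- stated objective: alternative
-- what changed: B builds a frequency table of the drives' states in one pass and computes ready by summing the table entries over the distinct requested states, with total from len() and unready by subtraction, instead of testing each drive's state for membership and maintaining two loop accumulators.
import Mathlib
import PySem

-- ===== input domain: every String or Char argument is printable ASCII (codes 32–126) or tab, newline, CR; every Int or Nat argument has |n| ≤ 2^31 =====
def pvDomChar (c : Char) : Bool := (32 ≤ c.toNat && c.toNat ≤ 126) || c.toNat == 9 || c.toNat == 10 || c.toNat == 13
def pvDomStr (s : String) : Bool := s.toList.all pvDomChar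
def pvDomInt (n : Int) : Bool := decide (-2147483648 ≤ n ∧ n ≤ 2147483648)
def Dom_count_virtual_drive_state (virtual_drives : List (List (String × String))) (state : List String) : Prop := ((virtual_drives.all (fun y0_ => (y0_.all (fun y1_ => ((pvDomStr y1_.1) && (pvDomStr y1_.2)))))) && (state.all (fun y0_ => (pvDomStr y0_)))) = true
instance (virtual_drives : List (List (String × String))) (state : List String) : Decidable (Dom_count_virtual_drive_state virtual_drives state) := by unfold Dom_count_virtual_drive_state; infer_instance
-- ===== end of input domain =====

-- B counts each state's frequency in one dict pass and sums over the distinct requested states; total/unready are derived arithmetically (objective: alternative).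


-- ===== PORT A =====
-- virtual_drive["state"]: first-match lookup; on the admitted inputs (Pre_) the key is present,
-- so the default "" is never consulted.
def count_virtual_drive_state (virtual_drives : List (List (String × String))) (state : List String) : Int × Int × Int :=
  let p := virtual_drives.foldl
    (fun (acc : Int × Int) vd =>
      let ready := state.contains ((vd.lookup "state").getD "")
      (acc.1 + (if ready then 1 else 0), acc.2 + (if ready then 0 else 1)))
    (0, 0)
  (p.1 + p.2, p.1, p.2)

-- ===== PORT B =====
-- counts[k] = counts.get(k, 0) + 1 over the drives; then ready += counts.get(s, 0) over set(state).
def count_virtual_drive_state_alt (virtual_drives : List (List (String × String))) (state : List String) : Int × Int × Int :=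
  let counts := virtual_drives.foldl
    (fun (d : PySem.Dict String Int) vd =>
      let k := (vd.lookup "state").getD ""
      d.insert k (d.getD k 0 + 1))
    PySem.Dict.empty
  let ready := (PySem.Set.ofList state).foldl (fun (acc : Int) s => acc + counts.getD s 0) 0
  let total : Int := virtual_drives.length
  (total, ready, total - ready)

-- ===== PRECONDITION & SPEC =====
-- Pre_ excludes exactly the inputs where some virtual drive lacks the "state" key: there the Python A raises KeyError.
def Pre_count_virtual_drive_state (virtual_drives : List (List (String × String))) (state : List String) : Prop :=
  ∀ vd ∈ virtual_drives, "state" ∈ vd.map Prod.fst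
instance (virtual_drives : List (List (String × String))) (state : List String) : Decidable (Pre_count_virtual_drive_state virtual_drives state) := by unfold Pre_count_virtual_drive_state; infer_instance
def pvWitness_count_virtual_drive_state : (List (List (String × String))) × List String :=
  ([[("state", "Optl")], [("state", "Dgrd"), ("size", "1 TB")]], ["Optl"])
def Spec_count_virtual_drive_state (virtual_drives : List (List (String × String))) (state : List String) (out : Int × Int × Int) : Prop := out = count_virtual_drive_state_alt virtual_drives state
instance (virtual_drives : List (List (String × String))) (state : List String) (out : Int × Int × Int) : Decidable (Spec_count_virtual_drive_state virtual_drives state out) := by unfold Spec_count_virtual_drive_state; infer_instance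

-- ===== CLAIM (what is proved, stated in full; the proofs are below) =====
def Claim_equal_count_virtual_drive_state : Prop := ∀ (virtual_drives : List (List (String × String))) (state : List String), Dom_count_virtual_drive_state virtual_drives state → Pre_count_virtual_drive_state virtual_drives state → Spec_count_virtual_drive_state virtual_drives state (count_virtual_drive_state virtual_drives state)

-- ===== LEMMAS AND PROOFS =====

-- Invariant of A's loop: starting from (a, b) it adds the ready count to a and the rest to b.
theorem cvds_foldl_inv (state : List String) (vds : List (List (String × String))) :
    ∀ (a b : Int),
      vds.foldl
        (fun (acc : Int × Int) vd =>
          let ready := state.contains ((vd.lookup "state").getD "")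
          (acc.1 + (if ready then 1 else 0), acc.2 + (if ready then 0 else 1)))
        (a, b)
      = (a + (vds.countP (fun vd => state.contains ((vd.lookup "state").getD "")) : Int),
         b + ((vds.length : Int) - (vds.countP (fun vd => state.contains ((vd.lookup "state").getD "")) : Int))) := by
  induction vds with
  | nil => intro a b; simp
  | cons vd rest ih =>
      intro a b
      simp only [List.foldl_cons, ih, List.countP_cons, List.length_cons]
      by_cases h : (vd.lookup "state").getD "" ∈ state
      · simp [h, Prod.ext_iff]; omega
      · simp [h, Prod.ext_iff]; omega

-- A foldl that only adds can be read as a mapped sum.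
theorem cvds_foldl_add (g : String → Int) (l : List String) :
    ∀ (a : Int), l.foldl (fun acc s => acc + g s) a = a + (l.map g).sum := by
  induction l with
  | nil => intro a; simp
  | cons x xs ih => intro a; simp [ih, add_assoc]

-- Summing an indicator over a duplicate-free list is a membership test.
theorem cvds_sum_indicator (k : String) (l : List String) (hnd : l.Nodup) :
    (l.map (fun s => if k == s then (1 : Int) else 0)).sum
      = if k ∈ l then (1 : Int) else 0 := by
  induction l with
  | nil => simp
  | cons x xs ih =>
      have hx := (List.nodup_cons.mp hnd).1
      have htail := ih (List.nodup_cons.mp hnd).2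
      by_cases hk : k = x
      · subst hk
        simp only [List.map_cons, List.sum_cons, htail, if_neg hx]
        simp
      · simp only [List.map_cons, List.sum_cons, htail]
        simp [hk]

-- Summing the multiset counts over a duplicate-free key list counts the members.
theorem cvds_sum_count (l : List String) (hnd : l.Nodup) (p : String → Bool)
    (hp : ∀ x, (x ∈ l) ↔ p x = true) (ks : List String) :
    (l.map (fun s => (ks.count s : Int))).sum = (ks.countP p : Int) := by
  induction ks with
  | nil => simp
  | cons k ks ih =>
      simp only [List.count_cons, List.countP_cons]
      push_cast
      have hsplit : (l.map (fun s => ((ks.count s : Int) + if k == s then 1 else 0))).sum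
          = (l.map (fun s => (ks.count s : Int))).sum
            + (l.map (fun s => if k == s then (1 : Int) else 0)).sum := by
        rw [← List.sum_map_add]
      rw [hsplit, ih, cvds_sum_indicator k l hnd]
      by_cases hk : p k = true
      · simp [hk, (hp k).mpr hk]
      · have : k ∉ l := fun h => hk ((hp k).mp h)
        simp [hk, this]

-- ===== VERDICT (by name: the statement is the Claim_ definition above) =====
theorem count_virtual_drive_state_spec : Claim_equal_count_virtual_drive_state := by
  intro vds state _ _
  unfold Spec_count_virtual_drive_state count_virtual_drive_state count_virtual_drive_state_alt
  simp only [cvds_foldl_inv]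
  have hdict : vds.foldl
      (fun (d : PySem.Dict String Int) vd =>
        let k := (vd.lookup "state").getD ""
        d.insert k (d.getD k 0 + 1))
      PySem.Dict.empty
    = PySem.Dict.counter (vds.map (fun vd => (vd.lookup "state").getD "")) := by
    rw [← PySem.Dict.foldl_insert_getD_add_one_eq_counter, List.foldl_map]
  rw [hdict]
  simp only [PySem.Dict.getD_counter]
  rw [cvds_foldl_add,
    cvds_sum_count _ (PySem.Set.nodup_ofList state) (fun x => state.contains x)
      (by intro x; simp [PySem.Set.mem_ofList]),
    List.countP_map]
  simp only [Function.comp_def]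
  refine Prod.ext ?_ (Prod.ext ?_ ?_) <;> simp
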